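-- pv_equiv track=rewrite | github.com/AIOSAI/devpass | MEMORY_BANK/code_archive/symbolic_memory-20260204T140520Z-3-001/symbolic_memory/symbolic_memory.py | extract_collaboration_patterns
-- ===== SOURCE A (Python) =====
-- def extract_collaboration_patterns(chat_history):
--     """Identify relationship dynamics and interaction patterns"""
--     if not chat_history:
--         return ["no_interaction"]
--
--     patterns = []
--     user_messages = [msg for msg in chat_history if msg.get("role") == "user"]
--     assistant_messages = [msg for msg in chat_history if msg.get("role") == "assistant"]
--
--     if not user_messages or not assistant_messages:
--         return ["one_sided_conversation"]
--
--     # Analyze message characteristics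
--     avg_user_length = sum(len(msg.get("content", "")) for msg in user_messages) / len(user_messages)
--     avg_assistant_length = sum(len(msg.get("content", "")) for msg in assistant_messages) / len(assistant_messages)
--
--     # Detect interaction styles
--     if avg_user_length > avg_assistant_length * 1.5:
--         patterns.append("user_directed")
--     elif avg_assistant_length > avg_user_length * 1.5:
--         patterns.append("assistant_detailed")
--     else:
--         patterns.append("balanced_exchange")
--
--     # Analyze question patterns
--     user_questions = sum(1 for msg in user_messages if "?" in msg.get("content", ""))
--     if user_questions > len(user_messages) * 0.6:
--         patterns.append("question_heavy")
--
--     # Detect coaching/teaching patterns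
--     coaching_indicators = ["try", "let's", "what if", "how about", "consider"]
--     teaching_indicators = ["explain", "show", "understand", "learn", "because"]
--
--     user_content = " ".join(msg.get("content", "").lower() for msg in user_messages)
--     assistant_content = " ".join(msg.get("content", "").lower() for msg in assistant_messages)
--
--     if any(indicator in user_content for indicator in coaching_indicators):
--         patterns.append("user_coaching")
--     if any(indicator in assistant_content for indicator in teaching_indicators):
--         patterns.append("assistant_teaching")
--
--     # Detect collaborative building
--     build_indicators = ["let's build", "we can", "together", "collaborate"]
--     if any(indicator in user_content + assistant_content for indicator in build_indicators):
--         patterns.append("collaborative_building")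
--
--     return patterns if patterns else ["standard_interaction"]
-- ===== SOURCE B (Python) =====
-- def extract_collaboration_patterns(chat_history):
--     """Single fused pass over chat_history with per-role accumulators; exact
--     integer cross-multiplication replaces the float average/ratio arithmetic."""
--     if not chat_history:
--         return ["no_interaction"]
--     nu = su = qu = 0
--     na = sa = 0
--     user_content = ""
--     assistant_content = ""
--     for msg in chat_history:
--         role = msg.get("role")
--         if role == "user":
--             c = msg.get("content", "")
--             user_content += (" " if nu else "") + c.lower()
--             nu += 1
--             su += len(c)
--             if "?" in c:
--                 qu += 1
--         elif role == "assistant":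
--             c = msg.get("content", "")
--             assistant_content += (" " if na else "") + c.lower()
--             na += 1
--             sa += len(c)
--     if nu == 0 or na == 0:
--         return ["one_sided_conversation"]
--     patterns = []
--     if 2 * su * na > 3 * sa * nu:
--         patterns.append("user_directed")
--     elif 2 * sa * nu > 3 * su * na:
--         patterns.append("assistant_detailed")
--     else:
--         patterns.append("balanced_exchange")
--     if 5 * qu > 3 * nu:
--         patterns.append("question_heavy")
--     if any(ind in user_content for ind in ("try", "let's", "what if", "how about", "consider")):
--         patterns.append("user_coaching")
--     if any(ind in assistant_content for ind in ("explain", "show", "understand", "learn", "because")):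
--         patterns.append("assistant_teaching")
--     combined = user_content + assistant_content
--     if any(ind in combined for ind in ("let's build", "we can", "together", "collaborate")):
--         patterns.append("collaborative_building")
--     return patterns
-- ===== Notes on version B (the rewrite author's own statement) =====
-- stated objective: alternative
-- what changed: B replaces A's five separate per-role traversals (two role filters, two length/join passes, a question-count pass) by one fused pass that keeps per-role count/length/question accumulators and builds each role's joined lowercased content incrementally, and replaces the float average/ratio arithmetic by exact integer cross-multiplication.
import Mathlib
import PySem

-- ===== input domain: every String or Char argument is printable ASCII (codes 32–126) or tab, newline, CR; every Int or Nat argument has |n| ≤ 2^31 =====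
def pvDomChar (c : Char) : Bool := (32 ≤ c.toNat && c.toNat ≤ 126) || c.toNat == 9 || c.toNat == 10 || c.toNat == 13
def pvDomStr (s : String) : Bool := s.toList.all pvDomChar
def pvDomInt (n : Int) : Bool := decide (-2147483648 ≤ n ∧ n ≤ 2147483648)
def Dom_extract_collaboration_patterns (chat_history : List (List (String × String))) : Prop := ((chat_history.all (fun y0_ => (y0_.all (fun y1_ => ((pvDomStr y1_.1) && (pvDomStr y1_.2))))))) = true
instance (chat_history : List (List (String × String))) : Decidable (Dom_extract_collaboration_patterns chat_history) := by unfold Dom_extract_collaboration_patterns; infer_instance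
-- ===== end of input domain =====

-- B replaces A's five separate per-role passes (two filters, two average/join passes, a question count)
-- by ONE fused pass with per-role accumulators, and the float average arithmetic by exact integer
-- cross-multiplication (objective: alternative decomposition; return value only, no mutation involved).

-- shared helpers (both Python versions spell these same literals / dict lookups)
def pvRole (m : List (String × String)) : Option String := (PySem.Dict.ofList m).get? "role"
def pvContent (m : List (String × String)) : String := (PySem.Dict.ofList m).getD "content" ""
def pvCoach : List String := ["try", "let's", "what if", "how about", "consider"]
def pvTeach : List String := ["explain", "show", "understand", "learn", "because"]
def pvBuild : List String := ["let's build", "we can", "together", "collaborate"]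

-- ===== PORT A =====
-- A's float comparisons (avg_user > avg_assistant*1.5 etc., questions > n*0.6) are ported as exact
-- integer cross-multiplications; exact except on the exact-1.5×-tie inputs that Pre_ excludes.
def extract_collaboration_patterns (chat_history : List (List (String × String))) : List String :=
  if chat_history = [] then ["no_interaction"]
  else
    let user_messages := chat_history.filter (fun m => pvRole m == some "user")
    let assistant_messages := chat_history.filter (fun m => pvRole m == some "assistant")
    if user_messages = [] ∨ assistant_messages = [] then ["one_sided_conversation"]
    else
      let su : Nat := (user_messages.map (fun m => (pvContent m).toList.length)).sum
      let sa : Nat := (assistant_messages.map (fun m => (pvContent m).toList.length)).sum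
      let nu := user_messages.length
      let na := assistant_messages.length
      let patterns :=
        if 2 * su * na > 3 * sa * nu then ["user_directed"]
        else if 2 * sa * nu > 3 * su * na then ["assistant_detailed"]
        else ["balanced_exchange"]
      let user_questions := (user_messages.filter (fun m => PySem.Chars.isIn "?".toList (pvContent m).toList)).length
      let patterns := patterns ++ (if 5 * user_questions > 3 * nu then ["question_heavy"] else [])
      let user_content := PySem.Chars.join " ".toList (user_messages.map (fun m => PySem.Chars.lower (pvContent m).toList))
      let assistant_content := PySem.Chars.join " ".toList (assistant_messages.map (fun m => PySem.Chars.lower (pvContent m).toList))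
      let patterns := patterns ++ (if pvCoach.any (fun i => PySem.Chars.isIn i.toList user_content) then ["user_coaching"] else [])
      let patterns := patterns ++ (if pvTeach.any (fun i => PySem.Chars.isIn i.toList assistant_content) then ["assistant_teaching"] else [])
      let patterns := patterns ++ (if pvBuild.any (fun i => PySem.Chars.isIn i.toList (user_content ++ assistant_content)) then ["collaborative_building"] else [])
      if patterns = [] then ["standard_interaction"] else patterns

-- ===== PORT B =====
structure PvStats where
  nu : Nat
  su : Nat
  qu : Nat
  uc : List Char
  na : Nat
  sa : Nat
  ac : List Char
  deriving Repr, DecidableEq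

def pvStep (s : PvStats) (m : List (String × String)) : PvStats :=
  let role := pvRole m
  if role == some "user" then
    let c := pvContent m
    { s with
      uc := s.uc ++ (if s.nu = 0 then [] else " ".toList) ++ PySem.Chars.lower c.toList
      nu := s.nu + 1
      su := s.su + c.toList.length
      qu := s.qu + (if PySem.Chars.isIn "?".toList c.toList then 1 else 0) }
  else if role == some "assistant" then
    let c := pvContent m
    { s with
      ac := s.ac ++ (if s.na = 0 then [] else " ".toList) ++ PySem.Chars.lower c.toList
      na := s.na + 1
      sa := s.sa + c.toList.length }
  else s

def extract_collaboration_patterns_alt (chat_history : List (List (String × String))) : List String :=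
  if chat_history = [] then ["no_interaction"]
  else
    let s := chat_history.foldl pvStep ⟨0, 0, 0, [], 0, 0, []⟩
    if s.nu = 0 ∨ s.na = 0 then ["one_sided_conversation"]
    else
      (if 2 * s.su * s.na > 3 * s.sa * s.nu then ["user_directed"]
       else if 2 * s.sa * s.nu > 3 * s.su * s.na then ["assistant_detailed"]
       else ["balanced_exchange"])
      ++ (if 5 * s.qu > 3 * s.nu then ["question_heavy"] else [])
      ++ (if pvCoach.any (fun i => PySem.Chars.isIn i.toList s.uc) then ["user_coaching"] else [])
      ++ (if pvTeach.any (fun i => PySem.Chars.isIn i.toList s.ac) then ["assistant_teaching"] else [])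
      ++ (if pvBuild.any (fun i => PySem.Chars.isIn i.toList (s.uc ++ s.ac)) then ["collaborative_building"] else [])

-- ===== PRECONDITION & SPEC =====
-- Pre_ excludes histories whose user/assistant average content lengths stand in an EXACT 1.5× ratio
-- (either direction): there Python A's strict float comparison hangs on double rounding of the two
-- averages (sometimes >, sometimes not), an artefact no exact re-implementation should match; B
-- classifies such exact ties as "balanced_exchange".
def Pre_extract_collaboration_patterns (chat_history : List (List (String × String))) : Prop :=
  let us := chat_history.filter (fun m => pvRole m == some "user")
  let as_ := chat_history.filter (fun m => pvRole m == some "assistant")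
  let su := (us.map (fun m => (pvContent m).toList.length)).sum
  let sa := (as_.map (fun m => (pvContent m).toList.length)).sum
  us.length = 0 ∨ as_.length = 0 ∨
    (2 * su * as_.length ≠ 3 * sa * us.length ∧ 2 * sa * us.length ≠ 3 * su * as_.length)
instance (chat_history : List (List (String × String))) : Decidable (Pre_extract_collaboration_patterns chat_history) := by unfold Pre_extract_collaboration_patterns; infer_instance

def pvWitness_extract_collaboration_patterns : (List (List (String × String))) :=
  [[("role", "user"), ("content", "can you explain?")], [("role", "assistant"), ("content", "sure")]]

def Spec_extract_collaboration_patterns (chat_history : List (List (String × String))) (out : List String) : Prop := out = extract_collaboration_patterns_alt chat_history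
instance (chat_history : List (List (String × String))) (out : List String) : Decidable (Spec_extract_collaboration_patterns chat_history out) := by unfold Spec_extract_collaboration_patterns; infer_instance

-- ===== CLAIM (what is proved, stated in full; the proofs are below) =====
def Claim_equal_extract_collaboration_patterns : Prop := ∀ (chat_history : List (List (String × String))), Dom_extract_collaboration_patterns chat_history → Pre_extract_collaboration_patterns chat_history → Spec_extract_collaboration_patterns chat_history (extract_collaboration_patterns chat_history)

-- ===== LEMMAS AND PROOFS =====

-- the text a run of user messages appends to the accumulator when n messages were already seen
def pvJoinFrom (n : Nat) (xs : List (List Char)) : List Char :=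
  if n = 0 then PySem.Chars.join " ".toList xs else (xs.map (fun c => ' ' :: c)).flatten

lemma pvJoinFrom_nil (n : Nat) : pvJoinFrom n [] = [] := by
  unfold pvJoinFrom
  split <;> simp [PySem.Chars.join, List.intercalate]

lemma pvJoin_cons (x : List Char) (t : List (List Char)) :
    PySem.Chars.join " ".toList (x :: t) = x ++ (t.map (fun c => ' ' :: c)).flatten := by
  induction t generalizing x with
  | nil => simp [PySem.Chars.join, List.intercalate]
  | cons y t ih =>
    have h : PySem.Chars.join " ".toList (x :: y :: t)
        = x ++ [' '] ++ PySem.Chars.join " ".toList (y :: t) := by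
      simp [PySem.Chars.join, List.intercalate, List.intersperse]
    rw [h, ih]
    simp

lemma pvJoinFrom_cons (n : Nat) (x : List Char) (t : List (List Char)) :
    pvJoinFrom n (x :: t) = (if n = 0 then [] else [' ']) ++ x ++ pvJoinFrom (n + 1) t := by
  rcases n with _ | n
  · simpa [pvJoinFrom] using pvJoin_cons x t
  · simp [pvJoinFrom]

lemma foldl_pvStep (l : List (List (String × String))) (s : PvStats) :
    l.foldl pvStep s =
      { nu := s.nu + (l.filter (fun m => pvRole m == some "user")).length
        su := s.su + ((l.filter (fun m => pvRole m == some "user")).map (fun m => (pvContent m).toList.length)).sum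
        qu := s.qu + ((l.filter (fun m => pvRole m == some "user")).filter (fun m => PySem.Chars.isIn "?".toList (pvContent m).toList)).length
        uc := s.uc ++ pvJoinFrom s.nu ((l.filter (fun m => pvRole m == some "user")).map (fun m => PySem.Chars.lower (pvContent m).toList))
        na := s.na + (l.filter (fun m => pvRole m == some "assistant")).length
        sa := s.sa + ((l.filter (fun m => pvRole m == some "assistant")).map (fun m => (pvContent m).toList.length)).sum
        ac := s.ac ++ pvJoinFrom s.na ((l.filter (fun m => pvRole m == some "assistant")).map (fun m => PySem.Chars.lower (pvContent m).toList)) } := by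
  induction l generalizing s with
  | nil => simp [pvJoinFrom_nil]
  | cons m l ih =>
    rw [List.foldl_cons, ih]
    by_cases hu : pvRole m = some "user"
    · simp [pvStep, hu, pvJoinFrom_cons]
      refine ⟨by omega, by omega, ?_⟩
      by_cases hq : PySem.Chars.isIn ['?'] (pvContent m).toList = true <;>
        (simp [hq, List.filter_filter]; try omega)
    · by_cases ha : pvRole m = some "assistant"
      · simp [pvStep, ha, pvJoinFrom_cons]
        omega
      · simp [pvStep, hu, ha]

-- ===== VERDICT (by name: the statement is the Claim_ definition above) =====
theorem extract_collaboration_patterns_spec : Claim_equal_extract_collaboration_patterns := by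
  intro ch _ _
  unfold Spec_extract_collaboration_patterns extract_collaboration_patterns extract_collaboration_patterns_alt
  by_cases hch : ch = []
  · simp [hch]
  · rw [if_neg hch, if_neg hch, foldl_pvStep]
    by_cases hu : ch.filter (fun m => pvRole m == some "user") = []
    · simp [hu]
    · by_cases ha : ch.filter (fun m => pvRole m == some "assistant") = []
      · simp [hu, ha]
      · simp [hu, ha, List.length_eq_zero_iff, pvJoinFrom]
        split_ifs <;> simp_all
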